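-- pv_equiv track=rewrite | github.com/aslamovamir/LeetCode | number_of_valid_words_in_a_sentence.py | countValidWords
-- ===== SOURCE A (Python) =====
-- def countValidWords(sentence: str) -> int:
--     # let's first split the string into words
--     words = sentence.split(' ')
--
--     # a helper function to check for hyphens and punctuation marks and digits
--     def hyph_punct_dig_violation(input_str):
--         if input_str[0] == '-' or input_str[len(input_str)-1] == '-':
--             return True
--         hyphen_found = False
--         for i in range(len(input_str)):
--             # check for hyphen
--             if input_str[i] == '-':
--                 if not hyphen_found:
--                     hyphen_found = True
--                 else:
--                     return True
--             # check for digit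
--             elif input_str[i].isdigit():
--                 return True
--             # check for punctuations
--             elif not input_str[i].isalpha():
--                 if i == len(input_str)-1 and (input_str[len(input_str)-2] != '-'):
--                     continue
--                 else:
--                     return True
--
--         return False
--
--     count = 0
--     for word in words:
--         if word == '':
--             continue
--         if not hyph_punct_dig_violation(word):
--             count += 1
--
--     return count
-- ===== SOURCE B (Python) =====
-- def countValidWords(sentence: str) -> int:
--     # Validate a word without scanning it char by char: peel one trailing
--     # punctuation mark, find the (single) hyphen, and check the two slices
--     # around it with str.isalpha().
--     def valid(word):
--         last = word[-1]
--         core = word if last.isalpha() or last.isdigit() or last == '-' else word[:-1]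
--         if core == '':
--             return True
--         i = core.find('-')
--         if i == -1:
--             return core.isalpha()
--         return core[:i].isalpha() and core[i + 1:].isalpha()
--
--     return sum(valid(w) for w in sentence.split(' ') if w)
-- ===== Notes on version B (the rewrite author's own statement) =====
-- stated objective: faster
-- what changed: Replaces A's stateful per-character Python scan (hyphen_found flag plus ordered elif chain with index arithmetic) by a loop-free validator built from C-level str primitives: peel one trailing punctuation mark, locate the hyphen with str.find, and check the two slices around it with str.isalpha.
import Mathlib
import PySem

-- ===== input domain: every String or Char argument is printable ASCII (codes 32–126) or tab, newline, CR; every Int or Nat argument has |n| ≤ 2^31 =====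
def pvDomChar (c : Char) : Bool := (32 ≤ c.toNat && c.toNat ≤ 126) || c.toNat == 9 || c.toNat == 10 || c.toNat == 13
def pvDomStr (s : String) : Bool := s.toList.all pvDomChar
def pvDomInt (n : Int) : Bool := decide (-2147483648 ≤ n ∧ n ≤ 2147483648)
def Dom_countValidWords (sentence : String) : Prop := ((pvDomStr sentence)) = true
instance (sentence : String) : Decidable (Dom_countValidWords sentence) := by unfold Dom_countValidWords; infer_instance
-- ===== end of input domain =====

-- B replaces A's stateful per-character scan (hyphen_found flag + ordered elif chain)
-- by a loop-free validator: peel one trailing punctuation mark, locate the hyphen with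
-- find, and check the two slices around it with isalpha; objective: faster (measured).


-- ===== PORT A =====
-- A's inner `for i in range(len(input_str))` loop: recursion over the remaining
-- characters, carrying the running index i and the hyphen_found flag.
def pvLoopA (cs : List Char) : List Char → Nat → Bool → Bool
  | [], _, _ => false
  | c :: r, i, hyphenFound =>
    if c = '-' then
      if !hyphenFound then pvLoopA cs r (i + 1) true else true
    else if PySem.Chars.isdigit c then true
    else if !(PySem.Chars.isalpha c) then
      if i = cs.length - 1 ∧ PySem.List.pyGet? cs ((cs.length : Int) - 2) ≠ some '-' then
        pvLoopA cs r (i + 1) hyphenFound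
      else true
    else pvLoopA cs r (i + 1) hyphenFound

-- A's helper hyph_punct_dig_violation
def pvViolA (cs : List Char) : Bool :=
  if PySem.List.pyGet? cs 0 = some '-' ∨ PySem.List.pyGet? cs ((cs.length : Int) - 1) = some '-' then
    true
  else pvLoopA cs cs 0 false

def countValidWords (sentence : String) : Int :=
  let words := PySem.Chars.splitOn sentence.toList [' ']
  words.foldl (fun count w =>
    if w = [] then count
    else if !pvViolA w then count + 1 else count) 0

-- ===== PORT B =====
-- B's helper valid(word): peel one trailing punctuation mark, find the hyphen,
-- check the two slices around it with isalpha.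
def pvValidWordB (w : List Char) : Bool :=
  match PySem.List.pyGet? w (-1) with       -- word[-1]
  | none => false                           -- unreachable: only called on nonempty words
  | some last =>
    let core :=
      if PySem.Chars.isalpha last || PySem.Chars.isdigit last || last == '-' then w
      else PySem.List.slice w none (some (-1))      -- word[:-1]
    if core = [] then true
    else
      let i := PySem.Chars.find core ['-']          -- core.find('-')
      if i = -1 then PySem.Chars.strIsalpha core
      else
        PySem.Chars.strIsalpha (PySem.List.slice core none (some i)) &&      -- core[:i]
        PySem.Chars.strIsalpha (PySem.List.slice core (some (i + 1)) none)   -- core[i+1:]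

def countValidWords_alt (sentence : String) : Int :=
  (PySem.Chars.splitOn sentence.toList [' ']).foldl
    (fun acc w => if w ≠ [] then acc + (if pvValidWordB w then 1 else 0) else acc) 0

-- ===== PRECONDITION & SPEC =====
def Spec_countValidWords (sentence : String) (out : Int) : Prop := out = countValidWords_alt sentence
instance (sentence : String) (out : Int) : Decidable (Spec_countValidWords sentence out) := by unfold Spec_countValidWords; infer_instance

-- ===== CLAIM (what is proved, stated in full; the proofs are below) =====
def Claim_equal_countValidWords : Prop := ∀ (sentence : String), Dom_countValidWords sentence → Spec_countValidWords sentence (countValidWords sentence)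

-- ===== LEMMAS AND PROOFS =====
def pvCoreOK (core : List Char) : Bool :=
  core.all (fun c => PySem.Chars.isalpha c || c == '-') &&
  decide (core.count '-' ≤ 1) && decide (core.head? ≠ some '-') && decide (core.getLast? ≠ some '-')

theorem pv_alpha_ne_hyphen (c : Char) (h : PySem.Chars.isalpha c = true) : c ≠ '-' := by
  rintro rfl; revert h; decide

theorem pv_coreOK_split (a b : List Char) :
    (PySem.Chars.strIsalpha a && PySem.Chars.strIsalpha b)
      = pvCoreOK (a ++ '-' :: b) := by
  rw [Bool.eq_iff_iff]
  simp only [Bool.and_eq_true, decide_eq_true_iff]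
  simp [PySem.Chars.strIsalpha, pvCoreOK, List.all_eq_true]
  constructor
  · rintro ⟨⟨ha, ha2⟩, hb, hb2⟩
    have h1 : a.count '-' = 0 :=
      List.count_eq_zero.mpr (fun hm => pv_alpha_ne_hyphen _ (ha2 _ hm) rfl)
    have h2 : b.count '-' = 0 :=
      List.count_eq_zero.mpr (fun hm => pv_alpha_ne_hyphen _ (hb2 _ hm) rfl)
    refine ⟨⟨⟨⟨fun x hx => Or.inl (ha2 x hx), fun x hx => Or.inl (hb2 x hx)⟩, by omega⟩, ?_⟩, ?_⟩
    · cases a with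
      | nil => exact absurd rfl ha
      | cons x xs => simpa using pv_alpha_ne_hyphen _ (ha2 x (by simp))
    · rw [List.getLast?_cons]
      cases hbl : b.getLast? with
      | none => simp [List.getLast?_eq_none_iff.mp hbl] at hb
      | some y =>
        have hy : y ∈ b := List.mem_of_getLast? hbl
        simpa [hbl] using pv_alpha_ne_hyphen _ (hb2 y hy)
  · rintro ⟨⟨⟨⟨ha2, hb2⟩, hcnt⟩, hhead⟩, hlastL⟩
    have ha0 : '-' ∉ a := by
      intro hm
      have := List.one_le_count_iff.mpr hm
      omega
    have hb0 : '-' ∉ b := by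
      intro hm
      have := List.one_le_count_iff.mpr hm
      omega
    have hane : a ≠ [] := by rintro rfl; simp at hhead
    have hbne : b ≠ [] := by rintro rfl; simp at hlastL
    refine ⟨⟨hane, fun x hx => ?_⟩, hbne, fun x hx => ?_⟩
    · rcases ha2 x hx with h | rfl
      · exact h
      · exact absurd hx ha0
    · rcases hb2 x hx with h | rfl
      · exact h
      · exact absurd hx hb0

theorem pv_find_hyphen_mem (core : List Char) :
    PySem.Chars.find core ['-'] = -1 ↔ '-' ∉ core := by
  rw [PySem.Chars.find_eq_neg_one_iff]
  constructor
  · intro h hm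
    obtain ⟨s, t, rfl⟩ := List.append_of_mem hm
    exact h ⟨s, t, by simp⟩
  · intro h hinf
    exact h (hinf.subset (by simp))

theorem pv_bcheck_eq (core : List Char) (hne : core ≠ []) :
    (if PySem.Chars.find core ['-'] = -1 then PySem.Chars.strIsalpha core
     else
       PySem.Chars.strIsalpha (PySem.List.slice core none (some (PySem.Chars.find core ['-']))) &&
       PySem.Chars.strIsalpha (PySem.List.slice core (some (PySem.Chars.find core ['-'] + 1)) none))
    = pvCoreOK core := by
  by_cases hf : PySem.Chars.find core ['-'] = -1
  · rw [if_pos hf]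
    have hmem : '-' ∉ core := (pv_find_hyphen_mem core).mp hf
    rw [Bool.eq_iff_iff]
    simp [PySem.Chars.strIsalpha, pvCoreOK, List.all_eq_true, hne]
    constructor
    · intro hall
      refine ⟨⟨⟨fun c hc => Or.inl (hall c hc), ?_⟩, ?_⟩, ?_⟩
      · simp [List.count_eq_zero.mpr hmem]
      · cases core with
        | nil => exact absurd rfl hne
        | cons x xs =>
          intro h
          simp only [List.head?_cons, Option.some.injEq] at h
          exact hmem (h ▸ List.mem_cons_self)
      · intro h
        exact hmem (List.mem_of_getLast? h)
    · rintro ⟨⟨⟨hall, -⟩, -⟩, -⟩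
      intro c hc
      rcases hall c hc with h | rfl
      · exact h
      · exact absurd hc hmem
  · rw [if_neg hf]
    have h0 : 0 ≤ PySem.Chars.find core ['-'] := by
      have := PySem.Chars.neg_one_le_find core ['-']
      omega
    set i := PySem.Chars.find core ['-'] with hi
    obtain ⟨hpre, hmin⟩ := PySem.Chars.find_spec (s := core) (sub := ['-']) h0
    have hk : core[i.toNat]? = some '-' := by
      obtain ⟨t, ht⟩ := hpre
      rw [← List.head?_drop, ← ht]
      rfl
    have hklt : i.toNat < core.length := by
      rw [List.getElem?_eq_some_iff] at hk
      exact hk.1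
    have hdecomp : core = core.take i.toNat ++ '-' :: core.drop (i.toNat + 1) := by
      conv_lhs => rw [← List.take_append_drop i.toNat core]
      congr 1
      rw [← List.getElem_cons_drop hklt]
      congr 1
      rw [List.getElem?_eq_some_iff] at hk
      exact hk.2
    have hs1 : PySem.List.slice core none (some i) = core.take i.toNat :=
      PySem.List.slice_to core h0
    have hs2 : PySem.List.slice core (some (i + 1)) none = core.drop (i.toNat + 1) := by
      rw [PySem.List.slice_from core (by omega)]
      congr 1
      omega
    rw [hs1, hs2, pv_coreOK_split]
    congr 2
    exact hdecomp.symm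

def pvGood (w : List Char) : Bool :=
  match w.getLast? with
  | none => false
  | some c =>
    if PySem.Chars.isalpha c || PySem.Chars.isdigit c || c == '-' then pvCoreOK w
    else pvCoreOK w.dropLast

theorem pvValidWordB_eq (w : List Char) (hne : w ≠ []) : pvValidWordB w = pvGood w := by
  unfold pvValidWordB pvGood
  rw [PySem.List.pyGet?_neg_one]
  cases hL : w.getLast? with
  | none => exact absurd (List.getLast?_eq_none_iff.mp hL) hne
  | some c =>
    by_cases hcl : (PySem.Chars.isalpha c || PySem.Chars.isdigit c || c == '-') = true
    · simp only [hcl, if_pos, if_true]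
      rw [if_neg hne]
      exact pv_bcheck_eq w hne
    · simp only [hcl, if_false, Bool.false_eq_true]
      rw [PySem.List.slice_to_neg_one]
      by_cases hd : w.dropLast = []
      · rw [if_pos hd, hd]
        decide
      · rw [if_neg hd]
        exact pv_bcheck_eq _ hd

theorem pv_alpha_not_digit (c : Char) (h : PySem.Chars.isalpha c = true) :
    PySem.Chars.isdigit c = false := by
  revert h
  simp [PySem.Chars.isalpha, PySem.Chars.isupper, PySem.Chars.islower, PySem.Chars.isdigit,
        Char.le_def, UInt32.le_iff_toNat_le, UInt32.lt_iff_toNat_lt]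
  omega

def pvPunctLoop (cs : List Char) : List (Int × Char) → Bool
  | [] => true
  | (i, c) :: r =>
    if c ≠ '-' ∧ !(PySem.Chars.isalpha c) then
      if i ≠ (cs.length : Int) - 1 ∨ (2 ≤ cs.length ∧ PySem.List.pyGet? cs (-2) = some '-') then
        false
      else pvPunctLoop cs r
    else pvPunctLoop cs r

theorem pv_ok_iff (c : Char) :
    (c == '-' || PySem.Chars.isalpha c) = true ↔ ¬(c ≠ '-' ∧ (!PySem.Chars.isalpha c) = true) := by
  simp
  constructor
  · rintro (h | h)
    · intro hc; exact absurd h hc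
    · intro _; exact h
  · intro h
    by_cases hc : c = '-'
    · exact Or.inl hc
    · exact Or.inr (h hc)

theorem pvPunctLoop_eq (cs : List Char) :
    ∀ (rest : List Char) (i : Nat), i + rest.length = cs.length →
      pvPunctLoop cs (PySem.List.enumerate rest i) =
        (rest.dropLast.all (fun c => c == '-' || PySem.Chars.isalpha c)
         && rest.getLast?.all (fun c => (c == '-' || PySem.Chars.isalpha c)
              || !(decide (2 ≤ cs.length ∧ PySem.List.pyGet? cs (-2) = some '-')))) := by
  intro rest
  induction rest with
  | nil => intro i _; simp [PySem.List.enumerate, pvPunctLoop]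
  | cons c r ih =>
    intro i hlen
    rw [PySem.List.enumerate_cons]
    cases r with
    | nil =>
      have hi : (i : Int) = (cs.length : Int) - 1 := by simp at hlen; omega
      by_cases hb : c ≠ '-' ∧ (!PySem.Chars.isalpha c) = true
      · have hok : (c == '-' || PySem.Chars.isalpha c) = false := by
          rw [← Bool.not_eq_true]
          intro h; exact (pv_ok_iff c).mp h hb
        rw [pvPunctLoop, if_pos hb]
        by_cases h2 : 2 ≤ cs.length ∧ PySem.List.pyGet? cs (-2) = some '-'
        · rw [if_pos (Or.inr h2)]
          simp [hok, h2]
        · rw [if_neg (by rintro (h | h); exacts [h hi, h2 h])]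
          simp [PySem.List.enumerate, pvPunctLoop, hok, h2]
      · have hok : (c == '-' || PySem.Chars.isalpha c) = true := (pv_ok_iff c).mpr hb
        rw [pvPunctLoop, if_neg hb]
        simp [PySem.List.enumerate, pvPunctLoop, hok]
    | cons c' r' =>
      have hne : (i : Int) ≠ (cs.length : Int) - 1 := by simp at hlen; omega
      have hih := ih (i + 1) (by simp at hlen ⊢; omega)
      rw [show ((i : Nat) : Int) + 1 = ((i + 1 : Nat) : Int) by push_cast; ring] at *
      by_cases hb : c ≠ '-' ∧ (!PySem.Chars.isalpha c) = true
      · have hok : (c == '-' || PySem.Chars.isalpha c) = false := by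
          rw [← Bool.not_eq_true]
          intro h; exact (pv_ok_iff c).mp h hb
        rw [pvPunctLoop, if_pos hb, if_pos (Or.inl hne)]
        simp [List.dropLast_cons_of_ne_nil, hok]
      · have hok : (c == '-' || PySem.Chars.isalpha c) = true := (pv_ok_iff c).mpr hb
        rw [pvPunctLoop, if_neg hb, hih]
        simp [List.dropLast_cons_of_ne_nil, hok]

def pvChecksA (cs : List Char) : Bool :=
  (PySem.List.pyGet? cs 0 ≠ some '-' && PySem.List.pyGet? cs (-1) ≠ some '-')
  && (cs.count '-' ≤ 1)
  && !(cs.any PySem.Chars.isdigit)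
  && pvPunctLoop cs (PySem.List.enumerate cs)

theorem pv_bad2_iff (d : List Char) (c : Char) :
    (2 ≤ (d ++ [c]).length ∧ PySem.List.pyGet? (d ++ [c]) (-2) = some '-')
      ↔ d.getLast? = some '-' := by
  by_cases hdne : d = []
  · subst hdne; simp [PySem.List.pyGet?]
  · have hlt : d.length - 1 < d.length := by
      have : 1 ≤ d.length := List.length_pos_iff.mpr hdne
      omega
    have hlen : 2 ≤ (d ++ [c]).length := by
      simp; omega
    have hg : PySem.List.pyGet? (d ++ [c]) (-2) = (d ++ [c])[(d ++ [c]).length - 2]? := by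
      have := PySem.List.pyGet?_neg_ofNat (d ++ [c]) 2 (by omega) (by omega)
      simpa using this
    have hdl : (d ++ [c]).length - 2 = d.length - 1 := by simp
    rw [hg, hdl, List.getElem?_append_left hlt, ← List.getLast?_eq_getElem?]
    simp only [hlen, true_and]

theorem pvChecksA_eq (w : List Char) (hnew : w ≠ []) : pvChecksA w = pvGood w := by
  obtain ⟨d, c, rfl⟩ : ∃ d c, w = d ++ [c] :=
    ⟨w.dropLast, w.getLast hnew, (List.dropLast_append_getLast hnew).symm⟩
  unfold pvChecksA pvGood
  have hp := pvPunctLoop_eq (d ++ [c]) (d ++ [c]) 0 (by simp)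
  simp only [Nat.cast_zero] at hp
  rw [hp]
  rw [PySem.List.pyGet?_neg_one]
  have h0 : PySem.List.pyGet? (d ++ [c]) 0 = (d ++ [c]).head? := by
    have := PySem.List.pyGet?_natCast (d ++ [c]) 0
    simpa [List.head?_eq_getElem?] using this
  rw [h0]
  simp only [decide_eq_decide.mpr (pv_bad2_iff d c)]
  simp only [List.getLast?_concat, List.dropLast_concat, Option.all_some]
  by_cases ha : PySem.Chars.isalpha c = true
  · rw [if_pos (by simp [ha])]
    have hcne : c ≠ '-' := pv_alpha_ne_hyphen c ha
    have hcnd : PySem.Chars.isdigit c = false := pv_alpha_not_digit c ha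
    rw [Bool.eq_iff_iff]
    simp [pvCoreOK, List.all_eq_true, ha, hcne, hcnd]
    constructor
    · rintro ⟨⟨⟨hh, hcnt⟩, hdig⟩, hall⟩
      exact ⟨⟨fun x hx => (hall x hx).elim Or.inr Or.inl, hcnt⟩, hh⟩
    · rintro ⟨⟨hall, hcnt⟩, hh⟩
      exact ⟨⟨⟨hh, hcnt⟩,
        fun x hx => (hall x hx).elim (pv_alpha_not_digit x) (fun h => by rw [h]; rfl)⟩,
        fun x hx => (hall x hx).elim Or.inr Or.inl⟩
  · by_cases hdg : PySem.Chars.isdigit c = true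
    · rw [if_pos (by simp [hdg])]
      have hcne : c ≠ '-' := by rintro rfl; revert hdg; decide
      rw [Bool.eq_iff_iff]
      simp [pvCoreOK, List.all_eq_true, hdg, hcne, ha]
    · by_cases hch : c = '-'
      · subst hch
        rw [if_pos (by simp)]
        rw [Bool.eq_iff_iff]
        simp [pvCoreOK, List.all_eq_true]
      · rw [if_neg (by simp [ha, hdg, hch])]
        rw [Bool.eq_iff_iff]
        simp [pvCoreOK, List.all_eq_true, ha, hdg, hch]
        constructor
        · rintro ⟨⟨⟨hh, hcnt⟩, hdig⟩, hall, hl⟩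
          exact ⟨⟨⟨fun x hx => (hall x hx).elim Or.inr Or.inl, hcnt⟩,
            fun he => hh (by simp [he])⟩, hl⟩
        · rintro ⟨⟨⟨hall, hcnt⟩, hh⟩, hl⟩
          refine ⟨⟨⟨?_, hcnt⟩,
            fun x hx => (hall x hx).elim (pv_alpha_not_digit x) (fun h => by rw [h]; rfl)⟩,
            fun x hx => (hall x hx).elim Or.inr Or.inl, hl⟩
          cases d with
          | nil => simpa using hch
          | cons a l =>
            simp only [List.head?_cons, Option.getD_some]
            intro h; exact hh (by simp [h])

-- Core per-word invariant: A's scan from position i (with hyphen flag h) flags a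
-- violation iff the remaining suffix has too many hyphens, a digit, or a
-- misplaced punctuation character.
theorem pvLoopA_eq (cs : List Char) :
    ∀ (rest : List Char) (i : Nat), rest = cs.drop i → ∀ (h : Bool),
      pvLoopA cs rest i h =
        (decide (2 ≤ rest.count '-' + (if h then 1 else 0))
          || rest.any PySem.Chars.isdigit
          || !pvPunctLoop cs (PySem.List.enumerate rest i)) := by
  intro rest
  induction rest with
  | nil =>
    intro i _ h
    cases h <;> simp [pvLoopA, PySem.List.enumerate, pvPunctLoop]
  | cons c r ih =>
    intro i hdrop h
    have hlen : i + (c :: r).length = cs.length := by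
      have hlc := congrArg List.length hdrop
      simp [List.length_drop] at hlc
      have hi : i < cs.length := by
        by_contra hge
        rw [List.drop_eq_nil_of_le (by omega)] at hdrop
        exact List.cons_ne_nil _ _ hdrop
      simp; omega
    have hdropr : r = cs.drop (i + 1) := by
      rw [← List.tail_drop, ← hdrop]; rfl
    simp only [pvLoopA, PySem.List.enumerate_cons]
    by_cases hc : c = '-'
    · subst hc
      cases h with
      | false =>
        rw [ih (i+1) hdropr true]
        simp [pvPunctLoop, show PySem.Chars.isdigit '-' = false from by decide]
      | true =>
        simp [pvPunctLoop]
    · by_cases hd : PySem.Chars.isdigit c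
      · simp [hc, hd]
      · by_cases ha : PySem.Chars.isalpha c
        · -- letter: everyone skips it
          rw [if_neg hc, if_neg (by simp [hd]), if_neg (by simp [ha])]
          rw [ih (i+1) hdropr h]
          simp [pvPunctLoop, hc, hd, ha]
        · -- punctuation character
          rw [if_neg hc, if_neg (by simp [hd]), if_pos (by simp [ha])]
          by_cases hlast : i = cs.length - 1
          · -- last position: r = []
            have hr : r = [] := by
              have hl := hlen; simp at hl
              apply List.eq_nil_of_length_eq_zero
              omega
            subst hr
            have hcsne : cs ≠ [] := by
              intro hnil; rw [hnil] at hdrop; simp at hdrop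
            have hilast : (i : Int) = (cs.length : Int) - 1 := by
              have : 1 ≤ cs.length := List.length_pos_iff.mpr hcsne
              omega
            by_cases h2 : 2 ≤ cs.length
            · -- the two ways of indexing position len-2 coincide
              have hneg : PySem.List.pyGet? cs (-2) = cs[cs.length - 2]? := by
                have := PySem.List.pyGet?_neg_ofNat cs 2 (by omega) (by omega)
                simpa using this
              have hpos : PySem.List.pyGet? cs ((cs.length : Int) - 2) = cs[cs.length - 2]? := by
                have h2' : ((cs.length : Int) - 2) = ((cs.length - 2 : Nat) : Int) := by omega
                rw [h2', PySem.List.pyGet?_natCast]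
              by_cases hhy : cs[cs.length - 2]? = some '-'
              · rw [if_neg (by rw [hpos]; simp [hhy])]
                simp [pvPunctLoop, hc, ha, hneg, hhy, h2]
              · rw [if_pos ⟨hlast, by rw [hpos]; exact hhy⟩]
                cases h <;>
                  simp [pvLoopA, pvPunctLoop, PySem.List.enumerate,
                        hc, hd, hilast, hneg, hhy]
            · -- cs = [c], and c ≠ '-' makes A continue (word[-1] wraps to c itself)
              have h1 : cs.length = 1 := by
                have : 1 ≤ cs.length := List.length_pos_iff.mpr hcsne
                omega
              have hi0 : i = 0 := by omega
              subst hi0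
              have hcs : cs = [c] := by simpa using hdrop.symm
              subst hcs
              rw [if_pos ⟨hlast, by norm_num [PySem.List.pyGet?_neg_one]; simpa using hc⟩]
              cases h <;>
                simp [pvLoopA, pvPunctLoop, PySem.List.enumerate, hc, hd]
          · -- not the last position: both sides flag a violation
            have hne : (i : Int) ≠ (cs.length : Int) - 1 := by
              simp at hlen; omega
            rw [if_neg (by rintro ⟨h1, _⟩; exact hlast h1)]
            simp [pvPunctLoop, hc, ha, hne]

theorem pvViol_eq (cs : List Char) (hne : cs ≠ []) : (!pvViolA cs) = pvChecksA cs := by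
  have hlen : 1 ≤ cs.length := List.length_pos_iff.mpr hne
  have hlast : PySem.List.pyGet? cs ((cs.length : Int) - 1) = PySem.List.pyGet? cs (-1) := by
    have h1 : ((cs.length : Int) - 1) = ((cs.length - 1 : Nat) : Int) := by omega
    have h2 := PySem.List.pyGet?_neg_ofNat cs 1 (by omega) (by omega)
    rw [h1, PySem.List.pyGet?_natCast]
    simpa using h2.symm
  unfold pvViolA pvChecksA
  rw [hlast]
  by_cases h0 : PySem.List.pyGet? cs 0 = some '-'
  · simp [h0]
  · by_cases hL : PySem.List.pyGet? cs (-1) = some '-'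
    · simp [h0, hL]
    · rw [if_neg (by rintro (h | h); exacts [h0 h, hL h])]
      rw [pvLoopA_eq cs cs 0 (by simp) false]
      by_cases hcnt : cs.count '-' ≤ 1 <;>
        by_cases hdig : cs.any PySem.Chars.isdigit <;>
          simp [h0, hL, hcnt, hdig] <;> omega

theorem pvFold_eq (ws : List (List Char)) (acc : Int) :
    ws.foldl (fun count w =>
      if w = [] then count
      else if !pvViolA w then count + 1 else count) acc
    = ws.foldl (fun acc w => if w ≠ [] then acc + (if pvValidWordB w then 1 else 0) else acc) acc := by
  induction ws generalizing acc with
  | nil => simp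
  | cons w ws ih =>
    simp only [List.foldl_cons]
    by_cases hw : w = []
    · rw [if_pos hw, if_neg (by simp [hw])]; exact ih acc
    · have hword : (!pvViolA w) = pvValidWordB w := by
        rw [pvViol_eq w hw, pvChecksA_eq w hw, pvValidWordB_eq w hw]
      rw [if_neg hw, if_pos hw, hword, ih]
      cases pvValidWordB w <;> simp

-- ===== VERDICT (by name: the statement is the Claim_ definition above) =====
theorem countValidWords_spec : Claim_equal_countValidWords := by
  intro s _
  unfold Spec_countValidWords countValidWords countValidWords_alt
  exact pvFold_eq _ 0
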